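-- pv_equiv track=rewrite | github.com/wilmurillo-ai/Design-Assistant | .skills/openclaw-skills/skills/oaker-io/wewrite/scripts/extract_exemplar.py | extract_closing
-- ===== SOURCE A (Python) =====
-- def extract_closing(paragraphs, max_chars=250):
--     """Extract closing paragraph(s), reading backwards."""
--     result = []
--     total = 0
--     for p in reversed(paragraphs):
--         if total + len(p) > max_chars and result:
--             break
--         result.insert(0, p)
--         total += len(p)
--     return "\n\n".join(result)
-- ===== SOURCE B (Python) =====
-- def extract_closing(paragraphs, max_chars=250):
--     if not paragraphs:
--         return ""
--     total = sum(len(p) for p in paragraphs)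
--     skipped = 0
--     start = len(paragraphs) - 1
--     for i, p in enumerate(paragraphs):
--         if total - skipped <= max_chars:
--             start = i
--             break
--         skipped += len(p)
--     return "\n\n".join(paragraphs[start:])
-- ===== Notes on version B (the rewrite author's own statement) =====
-- stated objective: faster
-- what changed: A builds the result backwards with repeated insert(0, p) (quadratic in the kept suffix); B computes the total length in one pass, scans forward for the first index whose suffix fits the budget (defaulting to the last index), and returns a single slice joined.
import Mathlib
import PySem

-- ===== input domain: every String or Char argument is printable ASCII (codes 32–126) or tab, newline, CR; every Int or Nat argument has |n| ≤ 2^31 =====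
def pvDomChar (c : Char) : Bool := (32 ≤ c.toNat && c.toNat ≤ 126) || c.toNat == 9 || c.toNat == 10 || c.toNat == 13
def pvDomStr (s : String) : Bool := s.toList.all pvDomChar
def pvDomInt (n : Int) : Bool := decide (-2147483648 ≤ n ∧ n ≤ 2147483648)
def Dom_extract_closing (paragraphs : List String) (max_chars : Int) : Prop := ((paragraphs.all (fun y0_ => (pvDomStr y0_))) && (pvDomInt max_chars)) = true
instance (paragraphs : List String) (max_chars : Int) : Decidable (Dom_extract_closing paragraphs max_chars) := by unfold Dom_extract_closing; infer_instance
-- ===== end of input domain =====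

-- B replaces A's backward incremental list-building by a one-pass total length plus a
-- forward scan for the first index whose suffix fits the budget, then one slice + join
-- (objective: faster — avoids the repeated insert(0, p) list shifting; measurably faster on large inputs).


-- ===== PORT A =====
-- 'for p in reversed(paragraphs): if total+len(p) > max_chars and result: break; result.insert(0,p); total += len(p)'
def aLoop (max_chars : Int) : List String → List String → Int → List String
  | [], result, _ => result
  | p :: rest, result, total =>
    if total + PySem.Str.len p > max_chars ∧ result ≠ [] then result
    else aLoop max_chars rest (p :: result) (total + PySem.Str.len p)

def extract_closing (paragraphs : List String) (max_chars : Int) : String :=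
  PySem.Str.join "\n\n" (aLoop max_chars paragraphs.reverse [] 0)

-- ===== PORT B =====
-- forward scan: first index i with total - skipped ≤ max_chars ('break'), none if the loop finishes
def bFind (max_chars total : Int) : List String → Int → Nat → Option Nat
  | [], _, _ => none
  | p :: rest, skipped, i =>
    if total - skipped ≤ max_chars then some i
    else bFind max_chars total rest (skipped + PySem.Str.len p) (i + 1)

def extract_closing_alt (paragraphs : List String) (max_chars : Int) : String :=
  match paragraphs with
  | [] => ""
  | _ =>
    let total := (paragraphs.map PySem.Str.len).sum
    let start := (bFind max_chars total paragraphs 0 0).getD (paragraphs.length - 1)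
    PySem.Str.join "\n\n" (paragraphs.drop start)

-- ===== PRECONDITION & SPEC =====
def Spec_extract_closing (paragraphs : List String) (max_chars : Int) (out : String) : Prop := out = extract_closing_alt paragraphs max_chars
instance (paragraphs : List String) (max_chars : Int) (out : String) : Decidable (Spec_extract_closing paragraphs max_chars out) := by unfold Spec_extract_closing; infer_instance

-- ===== CLAIM (what is proved, stated in full; the proofs are below) =====
def Claim_equal_extract_closing : Prop := ∀ (paragraphs : List String) (max_chars : Int), Dom_extract_closing paragraphs max_chars → Spec_extract_closing paragraphs max_chars (extract_closing paragraphs max_chars)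

-- ===== LEMMAS AND PROOFS =====

-- total character length of a list of paragraphs
def totLen (ss : List String) : Int := (ss.map PySem.Str.len).sum

-- the cut index both programs compute: first index whose suffix fits, else length-1
def cut (max_chars : Int) : List String → Nat
  | [] => 0
  | p :: ps => if totLen (p :: ps) ≤ max_chars ∨ ps = [] then 0 else cut max_chars ps + 1

-- option form matching B's loop: first fitting index, none if no suffix fits
def cutO (max_chars : Int) : List String → Option Nat
  | [] => none
  | p :: ps => if totLen (p :: ps) ≤ max_chars then some 0 else (cutO max_chars ps).map (· + 1)

theorem strLen_nonneg (s : String) : 0 ≤ PySem.Str.len s := by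
  simp [PySem.Str.len_eq]

theorem totLen_nonneg (ss : List String) : 0 ≤ totLen ss := by
  induction ss with
  | nil => simp [totLen]
  | cons p ps ih =>
    have := strLen_nonneg p
    simp only [totLen, List.map_cons, List.sum_cons] at *
    omega

theorem totLen_reverse (ss : List String) : totLen ss.reverse = totLen ss := by
  simp [totLen, List.map_reverse, List.sum_reverse]

-- A's loop when everything left still fits: it takes everything
theorem aLoop_fits (max_chars : Int) (rs : List String) :
    ∀ (acc : List String) (b : Int), b + totLen rs ≤ max_chars →
      aLoop max_chars rs acc b = rs.reverse ++ acc := by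
  induction rs with
  | nil => intro acc b _; simp [aLoop]
  | cons p rest ih =>
    intro acc b hb
    have h1 := totLen_nonneg rest
    have h2 : totLen (p :: rest) = PySem.Str.len p + totLen rest := by
      simp [totLen]
    have hcond : ¬(b + PySem.Str.len p > max_chars ∧ acc ≠ []) := by
      intro hh; exact absurd hh.1 (by omega)
    rw [aLoop, if_neg hcond, ih (p :: acc) (b + PySem.Str.len p) (by omega)]
    simp

-- A's loop never reaches a trailing element once the budget is already blown
theorem aLoop_drop_last (max_chars : Int) (rs : List String) (p : String) :
    ∀ (acc : List String) (b : Int), (rs ≠ [] ∨ acc ≠ []) →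
      max_chars < b + totLen rs + PySem.Str.len p →
      aLoop max_chars (rs ++ [p]) acc b = aLoop max_chars rs acc b := by
  induction rs with
  | nil =>
    intro acc b hne hb
    have hacc : acc ≠ [] := by tauto
    have : totLen ([] : List String) = 0 := by simp [totLen]
    rw [List.nil_append]
    show aLoop max_chars [p] acc b = acc
    rw [aLoop, if_pos ⟨by omega, hacc⟩]
  | cons q rest ih =>
    intro acc b hne hb
    have h2 : totLen (q :: rest) = PySem.Str.len q + totLen rest := by simp [totLen]
    by_cases hc : b + PySem.Str.len q > max_chars ∧ acc ≠ []
    · rw [List.cons_append, aLoop, if_pos hc, aLoop, if_pos hc]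
    · rw [List.cons_append, aLoop, if_neg hc, aLoop, if_neg hc]
      exact ih (q :: acc) (b + PySem.Str.len q) (Or.inr (by simp)) (by omega)

-- A's result is the suffix starting at the cut index
theorem aLoop_eq_drop_cut (max_chars : Int) (ps : List String) :
    aLoop max_chars ps.reverse [] 0 = ps.drop (cut max_chars ps) := by
  induction ps with
  | nil => simp [aLoop, cut]
  | cons p ps' ih =>
    rcases eq_or_ne ps' [] with h | h
    · subst h
      have : totLen ([] : List String) = 0 := by simp [totLen]
      simp [aLoop, cut]
    · by_cases hfit : totLen (p :: ps') ≤ max_chars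
      · rw [cut, if_pos (Or.inl hfit), List.drop_zero]
        have := aLoop_fits max_chars (p :: ps').reverse [] 0
          (by rw [totLen_reverse]; omega)
        simpa using this
      · rw [cut, if_neg (by tauto), List.drop_succ_cons]
        rw [List.reverse_cons]
        have h2 : totLen (p :: ps') = PySem.Str.len p + totLen ps' := by simp [totLen]
        rw [aLoop_drop_last max_chars ps'.reverse p [] 0
          (Or.inl (by simpa using h))
          (by rw [totLen_reverse]; omega)]
        exact ih

-- B's loop computes cutO, shifted by the running index
theorem bFind_eq_cutO (max_chars : Int) (ps : List String) :
    ∀ (sk : Int) (i : Nat),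
      bFind max_chars (sk + totLen ps) ps sk i = (cutO max_chars ps).map (i + ·) := by
  induction ps with
  | nil => intro sk i; simp [bFind, cutO]
  | cons p ps' ih =>
    intro sk i
    have h2 : totLen (p :: ps') = PySem.Str.len p + totLen ps' := by simp [totLen]
    by_cases hfit : totLen (p :: ps') ≤ max_chars
    · rw [bFind, if_pos (by omega), cutO, if_pos hfit]
      simp
    · rw [bFind, if_neg (by omega), cutO, if_neg hfit]
      have heq : sk + totLen (p :: ps') = (sk + PySem.Str.len p) + totLen ps' := by omega
      rw [heq, ih (sk + PySem.Str.len p) (i + 1)]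
      cases hc : cutO max_chars ps' with
      | none => simp
      | some j => simp; omega

theorem cutO_none_cut (max_chars : Int) (ps : List String) (h : cutO max_chars ps = none) :
    cut max_chars ps = ps.length - 1 := by
  induction ps with
  | nil => simp [cut]
  | cons p ps' ih =>
    rcases eq_or_ne ps' [] with he | he
    · subst he; simp [cut]
    · by_cases hfit : totLen (p :: ps') ≤ max_chars
      · rw [cutO, if_pos hfit] at h; exact absurd h (by simp)
      · rw [cutO, if_neg hfit] at h
        have hnone : cutO max_chars ps' = none := by
            cases hc : cutO max_chars ps' with
            | none => rfl
            | some j => rw [hc] at h; simp at h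
        rw [cut, if_neg (by tauto), ih hnone]
        have : ps'.length ≠ 0 := by simpa using he
        simp only [List.length_cons]; omega

theorem cutO_some_cut (max_chars : Int) (ps : List String) (j : Nat)
    (h : cutO max_chars ps = some j) : cut max_chars ps = j := by
  induction ps generalizing j with
  | nil => simp [cutO] at h
  | cons p ps' ih =>
    rw [cutO] at h
    split_ifs at h with hfit
    · rw [cut, if_pos (Or.inl hfit)]; simpa using h
    · cases hc : cutO max_chars ps' with
      | none => rw [hc] at h; simp at h
      | some j' =>
        rw [hc] at h; simp at h
        have hne : ps' ≠ [] := by rintro rfl; simp [cutO] at hc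
        rw [cut, if_neg (by tauto), ih j' hc]
        omega

-- ===== VERDICT (by name: the statement is the Claim_ definition above) =====
theorem extract_closing_spec : Claim_equal_extract_closing := by
  intro ps mc _
  unfold Spec_extract_closing extract_closing extract_closing_alt
  rw [aLoop_eq_drop_cut]
  cases ps with
  | nil => simp [cut, PySem.Str.join]
  | cons p ps' =>
    have hb := bFind_eq_cutO mc (p :: ps') 0 0
    rw [zero_add] at hb
    show PySem.Str.join "\n\n" ((p :: ps').drop (cut mc (p :: ps'))) =
      PySem.Str.join "\n\n" ((p :: ps').drop
        ((bFind mc (totLen (p :: ps')) (p :: ps') 0 0).getD ((p :: ps').length - 1)))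
    rw [hb]
    cases hc : cutO mc (p :: ps') with
    | none => rw [cutO_none_cut mc (p :: ps') hc]; simp
    | some j => rw [cutO_some_cut mc (p :: ps') j hc]; simp
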